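-- pv_equiv track=rewrite | github.com/joscasgom1/PMS | src/BMRF.py | comparar_hojas
-- ===== SOURCE A (Python) =====
-- import heapq
--
-- def comparar_hojas(hojas_OOB, hojas_test, k):
--     coincidencias = {}
--     hojas_OOB_sets = {
--         idx_muestra: set((idx_arbol, hoja_terminal) for idx_arbol, hoja_terminal in hojas.items())
--         for idx_muestra, hojas in hojas_OOB.items()
--     }
--     hojas_test_sets = {
--         idx_muestra: set((idx_arbol, hoja_terminal) for idx_arbol, hoja_terminal in hojas.items())
--         for idx_muestra, hojas in hojas_test.items()
--     }
--
--     for idx_test, hojas_t_set in hojas_test_sets.items():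
--         mejores_matches = heapq.nlargest(
--             k,
--             (
--                 (idx_train, len(hojas_t_set & hojas_o_set))
--                 for idx_train, hojas_o_set in hojas_OOB_sets.items()
--             ),
--             key=lambda x: x[1]
--         )
--         coincidencias[idx_test] = mejores_matches
--
--     return coincidencias
-- ===== SOURCE B (Python) =====
-- import heapq
--
-- def comparar_hojas(hojas_OOB, hojas_test, k):
--     # inverted index: (tree, leaf) -> OOB sample indices landing in that leaf
--     indice = {}
--     for idx_train, hojas in hojas_OOB.items():
--         for idx_arbol, hoja_terminal in hojas.items():
--             indice.setdefault((idx_arbol, hoja_terminal), []).append(idx_train)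
--     orden_train = list(hojas_OOB.keys())
--     coincidencias = {}
--     for idx_test, hojas in hojas_test.items():
--         cuenta = {}
--         for idx_arbol, hoja_terminal in hojas.items():
--             for idx_train in indice.get((idx_arbol, hoja_terminal), ()):
--                 cuenta[idx_train] = cuenta.get(idx_train, 0) + 1
--         coincidencias[idx_test] = heapq.nlargest(
--             k,
--             ((idx_train, cuenta.get(idx_train, 0)) for idx_train in orden_train),
--             key=lambda x: x[1],
--         )
--     return coincidencias
-- ===== Notes on version B (the rewrite author's own statement) =====
-- stated objective: alternative
-- what changed: Replaces the per-test-pair set intersections (every test sample intersected with every OOB sample's leaf set) by an inverted index on (tree,leaf) pairs built once, accumulating overlap counts per train index, then the same nlargest selection; intended as faster, measured only ~1.4x at n=1024 (not confirmed).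
import Mathlib
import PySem

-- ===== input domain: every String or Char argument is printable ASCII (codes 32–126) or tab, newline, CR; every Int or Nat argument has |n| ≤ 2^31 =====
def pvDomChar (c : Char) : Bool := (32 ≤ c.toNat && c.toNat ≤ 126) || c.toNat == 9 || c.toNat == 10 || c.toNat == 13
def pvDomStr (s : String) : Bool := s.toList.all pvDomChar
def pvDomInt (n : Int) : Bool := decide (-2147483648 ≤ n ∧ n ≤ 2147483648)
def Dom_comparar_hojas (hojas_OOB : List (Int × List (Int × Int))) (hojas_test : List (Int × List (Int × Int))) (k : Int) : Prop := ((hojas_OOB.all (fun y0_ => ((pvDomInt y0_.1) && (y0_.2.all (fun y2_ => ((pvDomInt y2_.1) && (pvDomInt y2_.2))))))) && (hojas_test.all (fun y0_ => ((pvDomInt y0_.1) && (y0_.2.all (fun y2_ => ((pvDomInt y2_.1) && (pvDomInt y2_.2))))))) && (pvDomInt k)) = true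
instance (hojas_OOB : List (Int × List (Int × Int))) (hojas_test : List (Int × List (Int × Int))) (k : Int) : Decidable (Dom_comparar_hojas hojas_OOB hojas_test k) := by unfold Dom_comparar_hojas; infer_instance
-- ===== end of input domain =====

-- B replaces A's all-pairs set intersections by an inverted index on (tree, leaf) pairs that
-- accumulates the overlap counts, keeping the same nlargest selection (objective: alternative;
-- intended as faster, but a timing run measured only ~1.4x at n=1024, so no speed is claimed).

-- ===== PORT A =====
-- heapq.nlargest(k, it, key) is ported as sorted(it, key=key, reverse=True)[:k]
-- (the documented equivalence; it returns [] for k ≤ 0, hence .take k.toNat).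
def comparar_hojas (hojas_OOB : List (Int × List (Int × Int))) (hojas_test : List (Int × List (Int × Int))) (k : Int) : List (Int × List (Int × Int)) :=
  let hojas_OOB_sets : List (Int × PySem.Set (Int × Int)) :=
    hojas_OOB.map (fun p => (p.1, PySem.Set.ofList p.2))
  let hojas_test_sets : List (Int × PySem.Set (Int × Int)) :=
    hojas_test.map (fun p => (p.1, PySem.Set.ofList p.2))
  hojas_test_sets.foldl (fun coincidencias p =>
    coincidencias ++ [(p.1,
      (PySem.List.sorted
        (hojas_OOB_sets.map (fun q => (q.1, (PySem.Set.len (PySem.Set.inter p.2 q.2) : Int))))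
        (fun x => x.2) true).take k.toNat)]) []

-- ===== PORT B =====
def comparar_hojas_alt (hojas_OOB : List (Int × List (Int × Int))) (hojas_test : List (Int × List (Int × Int))) (k : Int) : List (Int × List (Int × Int)) :=
  let indice : PySem.Dict (Int × Int) (List Int) :=
    hojas_OOB.foldl (fun d p => p.2.foldl (fun d par => d.modify par [] (· ++ [p.1])) d) PySem.Dict.empty
  let orden_train : List Int := hojas_OOB.map (·.1)
  hojas_test.foldl (fun coincidencias p =>
    let cuenta : PySem.Dict Int Int :=
      p.2.foldl (fun c par =>
        (indice.getD par []).foldl (fun c i => c.insert i (c.getD i 0 + 1)) c) PySem.Dict.empty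
    coincidencias ++ [(p.1,
      (PySem.List.sorted (orden_train.map (fun i => (i, cuenta.getD i 0)))
        (fun x => x.2) true).take k.toNat)]) []

-- ===== PRECONDITION & SPEC =====
-- Pre_ admits exactly the association lists that represent Python dicts (unique keys at both
-- nesting levels); a list with a duplicated key corresponds to no dict input of A.
def Pre_comparar_hojas (hojas_OOB : List (Int × List (Int × Int))) (hojas_test : List (Int × List (Int × Int))) (k : Int) : Prop :=
  (hojas_OOB.map (·.1)).Nodup ∧ (hojas_test.map (·.1)).Nodup ∧
  (∀ p ∈ hojas_OOB, (p.2.map (·.1)).Nodup) ∧ (∀ p ∈ hojas_test, (p.2.map (·.1)).Nodup)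
instance (hojas_OOB : List (Int × List (Int × Int))) (hojas_test : List (Int × List (Int × Int))) (k : Int) : Decidable (Pre_comparar_hojas hojas_OOB hojas_test k) := by unfold Pre_comparar_hojas; infer_instance

def pvWitness_comparar_hojas : (List (Int × List (Int × Int))) × (List (Int × List (Int × Int))) × Int :=
  ([(1, [(0, 5), (1, 7)]), (2, [(0, 5), (1, 8)])], ([(9, [(0, 5), (1, 8)]), (8, [(2, 2)])], 2))

def Spec_comparar_hojas (hojas_OOB : List (Int × List (Int × Int))) (hojas_test : List (Int × List (Int × Int))) (k : Int) (out : List (Int × List (Int × Int))) : Prop := out = comparar_hojas_alt hojas_OOB hojas_test k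
instance (hojas_OOB : List (Int × List (Int × Int))) (hojas_test : List (Int × List (Int × Int))) (k : Int) (out : List (Int × List (Int × Int))) : Decidable (Spec_comparar_hojas hojas_OOB hojas_test k out) := by unfold Spec_comparar_hojas; infer_instance

-- ===== CLAIM (what is proved, stated in full; the proofs are below) =====
def Claim_equal_comparar_hojas : Prop := ∀ (hojas_OOB : List (Int × List (Int × Int))) (hojas_test : List (Int × List (Int × Int))) (k : Int), Dom_comparar_hojas hojas_OOB hojas_test k → Pre_comparar_hojas hojas_OOB hojas_test k → Spec_comparar_hojas hojas_OOB hojas_test k (comparar_hojas hojas_OOB hojas_test k)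

-- ===== LEMMAS AND PROOFS =====

-- the inner index-building loop appends v to the bucket of each pair it sees
lemma inner_index_getD (ps : List (Int × Int)) (d : PySem.Dict (Int × Int) (List Int)) (v : Int) (par : Int × Int) :
    (ps.foldl (fun d pr => d.modify pr [] (· ++ [v])) d).getD par []
      = d.getD par [] ++ List.replicate (ps.count par) v := by
  induction ps generalizing d with
  | nil => simp
  | cons pr rest ih =>
    simp only [List.foldl_cons, ih, PySem.Dict.getD_modify, List.count_cons]
    by_cases h : par = pr
    · simp [h, List.replicate_succ, List.append_assoc]
    · simp [h, Ne.symm h]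

-- the full inverted index: the bucket of `par` lists each train id, once per occurrence of `par`
lemma index_getD (L : List (Int × List (Int × Int))) (d : PySem.Dict (Int × Int) (List Int)) (par : Int × Int) :
    (L.foldl (fun d p => p.2.foldl (fun d pr => d.modify pr [] (· ++ [p.1])) d) d).getD par []
      = d.getD par [] ++ L.flatMap (fun p => List.replicate (p.2.count par) p.1) := by
  induction L generalizing d with
  | nil => simp
  | cons p rest ih => simp [List.foldl_cons, ih, inner_index_getD, List.append_assoc]

-- the counting loop sums, over the test pairs, the occurrences of i in each pair's bucket
lemma cuenta_getD (idx : PySem.Dict (Int × Int) (List Int)) (ps : List (Int × Int)) (c : PySem.Dict Int Int) (i : Int) :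
    (ps.foldl (fun c par => (idx.getD par []).foldl (fun c j => c.insert j (c.getD j 0 + 1)) c) c).getD i 0
      = c.getD i 0 + ((ps.map (fun par => ((idx.getD par []).count i : Int))).sum) := by
  induction ps generalizing c with
  | nil => simp
  | cons par rest ih =>
    simp only [List.foldl_cons, ih, PySem.Dict.getD_foldl_insert_add_one, List.map_cons, List.sum_cons]
    ring

-- with unique outer keys, only q's own bucket contribution survives at key q.1
lemma flatMap_replicate_count (L : List (Int × List (Int × Int))) (q : Int × List (Int × Int))
    (hnd : (L.map (·.1)).Nodup) (hq : q ∈ L) (par : Int × Int) :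
    (L.flatMap (fun p => List.replicate (p.2.count par) p.1)).count q.1 = q.2.count par := by
  induction L with
  | nil => simp at hq
  | cons p rest ih =>
    simp only [List.map_cons, List.nodup_cons] at hnd
    rcases List.mem_cons.mp hq with h | h
    · subst h
      have hz : (rest.flatMap (fun p => List.replicate (p.2.count par) p.1)).count q.1 = 0 := by
        rw [List.count_eq_zero]
        intro hmem
        rcases List.mem_flatMap.mp hmem with ⟨r, hr, hrep⟩
        exact hnd.1 ((List.eq_of_mem_replicate hrep) ▸ List.mem_map.mpr ⟨r, hr, rfl⟩)
      simp [List.count_append, hz]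
    · have hne : p.1 ≠ q.1 := by
        intro he
        exact hnd.1 (he ▸ List.mem_map.mpr ⟨q, h, rfl⟩)
      have := ih hnd.2 h
      simp [List.count_append, this, List.count_replicate, hne]

-- |set(ts) ∩ set(qs)| as a sum of per-pair occurrence counts (both lists duplicate-free)
lemma len_inter_eq_sum (ts qs : List (Int × Int)) (hts : ts.Nodup) (hqs : qs.Nodup) :
    (PySem.Set.len (PySem.Set.inter (PySem.Set.ofList ts) (PySem.Set.ofList qs)) : Int)
      = (ts.map (fun par => ((qs.count par : Nat) : Int))).sum := by
  rw [PySem.Set.ofList_eq_self_of_nodup ts hts]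
  simp only [PySem.Set.len, PySem.Set.inter]
  have hfil : ts.filter (fun x => (PySem.Set.ofList qs).contains x)
      = ts.filter (fun x => decide (x ∈ qs)) :=
    List.filter_congr (fun x _ => by simp [PySem.Set.mem_ofList])
  rw [hfil]
  clear hts hfil
  induction ts with
  | nil => simp
  | cons a rest ih =>
    simp only [List.filter_cons, List.map_cons, List.sum_cons]
    by_cases h : a ∈ qs
    · have hc : qs.count a = 1 := List.count_eq_one_of_mem hqs h
      simp [h, hc, ← ih]
      ring
    · have hc : qs.count a = 0 := List.count_eq_zero_of_not_mem h
      simp [h, hc, ← ih]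

-- per-test equality of A's intersection-size list and B's index-count list
lemma counts_eq (hojas_OOB : List (Int × List (Int × Int))) (ts : List (Int × Int))
    (hnd : (hojas_OOB.map (·.1)).Nodup)
    (hinner : ∀ p ∈ hojas_OOB, (p.2.map (·.1)).Nodup)
    (hts : (ts.map (·.1)).Nodup) :
    ((hojas_OOB.map (fun p => (p.1, PySem.Set.ofList p.2))).map
        (fun q => (q.1, (PySem.Set.len (PySem.Set.inter (PySem.Set.ofList ts) q.2) : Int))))
      = (hojas_OOB.map (·.1)).map (fun i => (i,
          ((ts.foldl (fun c par =>
              (((hojas_OOB.foldl (fun d p => p.2.foldl (fun d pr => d.modify pr [] (· ++ [p.1])) d) PySem.Dict.empty).getD par []).foldl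
                (fun c j => c.insert j (c.getD j 0 + 1)) c)) PySem.Dict.empty).getD i 0))) := by
  simp only [List.map_map]
  apply List.map_congr_left
  intro q hq
  simp only [Function.comp]
  refine Prod.ext rfl ?_
  rw [cuenta_getD]
  simp only [PySem.Dict.getD_empty, zero_add]
  have hsum : (ts.map (fun par =>
      ((((hojas_OOB.foldl (fun d p => p.2.foldl (fun d pr => d.modify pr [] (· ++ [p.1])) d) PySem.Dict.empty).getD par []).count q.1 : Nat) : Int)))
      = ts.map (fun par => ((q.2.count par : Nat) : Int)) := by
    apply List.map_congr_left
    intro par _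
    rw [index_getD, PySem.Dict.getD_empty, List.nil_append,
        flatMap_replicate_count hojas_OOB q hnd hq par]
  rw [hsum]
  exact len_inter_eq_sum ts q.2 (hts.of_map _) ((hinner q hq).of_map _)

-- ===== VERDICT (by name: the statement is the Claim_ definition above) =====
theorem comparar_hojas_spec : Claim_equal_comparar_hojas := by
  intro hojas_OOB hojas_test k _ hpre
  obtain ⟨h1, _h2, h3, h4⟩ := hpre
  unfold Spec_comparar_hojas
  simp only [comparar_hojas, comparar_hojas_alt,
    PySem.List.foldl_append_singleton_eq_map, List.map_map]
  apply List.map_congr_left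
  intro p hp
  simp only [Function.comp]
  refine Prod.ext rfl ?_
  have := counts_eq hojas_OOB p.2 h1 h3 (h4 p hp)
  simp only [List.map_map] at this
  rw [this]
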